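-- pv_equiv track=rewrite | github.com/ovspraveen/CP_scheduling | CP_Scheduling_Code.py | generate_working_intervals_full
-- ===== SOURCE A (Python) =====
-- def merge_intervals(intervals):
--     """Merge overlapping intervals (each as (s, e))."""
--     if not intervals:
--         return []
--     intervals = sorted(intervals, key=lambda x: x[0])
--     merged = []
--     current_start, current_end = intervals[0]
--     for s, e in intervals[1:]:
--         if s <= current_end:
--             current_end = max(current_end, e)
--         else:
--             merged.append((current_start, current_end))
--             current_start, current_end = s, e
--     merged.append((current_start, current_end))
--     return merged
--
-- def generate_working_intervals_full(horizon, fixed_intervals):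
--     """Returns intervals [0, horizon] not covered by any fixed interval."""
--     merged_fixed = merge_intervals(fixed_intervals)
--     working = []
--     prev_end = 0
--     for s, e in merged_fixed:
--         if s > prev_end:
--             working.append((prev_end, s))
--         prev_end = max(prev_end, e)
--     if prev_end < horizon:
--         working.append((prev_end, horizon))
--     return working
-- ===== SOURCE B (Python) =====
-- def generate_working_intervals_full(horizon, fixed_intervals):
--     """Returns intervals [0, horizon] not covered by any fixed interval.
--
--     Single fused pass: sort once by start, then walk the intervals directly,
--     emitting a gap whenever an interval starts beyond the running end reached
--     so far; no intermediate merged list is built.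
--     """
--     working = []
--     prev_end = 0
--     for s, e in sorted(fixed_intervals, key=lambda iv: iv[0]):
--         if s > prev_end:
--             working.append((prev_end, s))
--         if e > prev_end:
--             prev_end = e
--     if prev_end < horizon:
--         working.append((prev_end, horizon))
--     return working
-- ===== Notes on version B (the rewrite author's own statement) =====
-- stated objective: simpler
-- what changed: B fuses A's two passes (build a merged-interval list, then scan it for gaps) into a single fold over the start-sorted intervals that emits gaps and tracks the running end directly, never materialising the merged list.
import Mathlib
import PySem

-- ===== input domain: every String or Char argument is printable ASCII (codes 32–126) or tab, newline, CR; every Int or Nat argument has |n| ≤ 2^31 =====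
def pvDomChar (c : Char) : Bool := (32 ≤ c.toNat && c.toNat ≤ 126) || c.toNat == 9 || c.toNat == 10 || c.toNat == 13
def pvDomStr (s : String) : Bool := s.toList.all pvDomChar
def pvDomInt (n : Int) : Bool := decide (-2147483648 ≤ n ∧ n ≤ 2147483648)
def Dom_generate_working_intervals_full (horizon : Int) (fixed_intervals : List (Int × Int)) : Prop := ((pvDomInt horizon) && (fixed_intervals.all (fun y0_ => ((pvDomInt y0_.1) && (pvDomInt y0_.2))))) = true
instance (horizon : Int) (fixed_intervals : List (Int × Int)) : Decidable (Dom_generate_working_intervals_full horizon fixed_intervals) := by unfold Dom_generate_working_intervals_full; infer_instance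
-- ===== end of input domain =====

-- B fuses A's merge-then-complement two-pass scheme into one fold over the sorted
-- intervals (no intermediate merged list); objective: simpler, same return value.

-- ===== PORT A =====
-- A's merge loop: running group (cs, ce), finished groups accumulated in `merged`.
def pvMergeLoop : List (Int × Int) → List (Int × Int) → Int → Int → List (Int × Int)
  | [], merged, cs, ce => merged ++ [(cs, ce)]
  | (s, e) :: rest, merged, cs, ce =>
      if s ≤ ce then pvMergeLoop rest merged cs (max ce e)
      else pvMergeLoop rest (merged ++ [(cs, ce)]) s e

def merge_intervals (intervals : List (Int × Int)) : List (Int × Int) :=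
  if intervals = [] then []
  else
    match PySem.List.sorted intervals (fun x => x.1) false with
    | [] => []   -- unreachable: sorting a nonempty list is nonempty
    | (cs, ce) :: rest => pvMergeLoop rest [] cs ce

-- A's complement loop body over the merged list, state = (working, prev_end).
def pvGapStep (st : List (Int × Int) × Int) (iv : Int × Int) : List (Int × Int) × Int :=
  ((if iv.1 > st.2 then st.1 ++ [(st.2, iv.1)] else st.1), max st.2 iv.2)

def generate_working_intervals_full (horizon : Int) (fixed_intervals : List (Int × Int)) : List (Int × Int) :=
  let merged_fixed := merge_intervals fixed_intervals
  let st := merged_fixed.foldl pvGapStep ([], 0)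
  if st.2 < horizon then st.1 ++ [(st.2, horizon)] else st.1

-- ===== PORT B =====
-- B's single fused loop body, state = (working, prev_end).
def pvSweepStep (st : List (Int × Int) × Int) (iv : Int × Int) : List (Int × Int) × Int :=
  ((if iv.1 > st.2 then st.1 ++ [(st.2, iv.1)] else st.1),
   if iv.2 > st.2 then iv.2 else st.2)

def generate_working_intervals_full_alt (horizon : Int) (fixed_intervals : List (Int × Int)) : List (Int × Int) :=
  let fin := (PySem.List.sorted fixed_intervals (fun iv => iv.1) false).foldl pvSweepStep ([], 0)
  if fin.2 < horizon then fin.1 ++ [(fin.2, horizon)] else fin.1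

-- ===== PRECONDITION & SPEC =====
def Spec_generate_working_intervals_full (horizon : Int) (fixed_intervals : List (Int × Int)) (out : List (Int × Int)) : Prop := out = generate_working_intervals_full_alt horizon fixed_intervals
instance (horizon : Int) (fixed_intervals : List (Int × Int)) (out : List (Int × Int)) : Decidable (Spec_generate_working_intervals_full horizon fixed_intervals out) := by unfold Spec_generate_working_intervals_full; infer_instance

-- ===== CLAIM (what is proved, stated in full; the proofs are below) =====
def Claim_equal_generate_working_intervals_full : Prop := ∀ (horizon : Int) (fixed_intervals : List (Int × Int)), Dom_generate_working_intervals_full horizon fixed_intervals → Spec_generate_working_intervals_full horizon fixed_intervals (generate_working_intervals_full horizon fixed_intervals)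

-- ===== LEMMAS AND PROOFS =====

-- B's step is A's complement step (the two `prev_end` updates agree).
theorem pvSweepStep_eq_pvGapStep : pvSweepStep = pvGapStep := by
  funext st iv
  refine Prod.ext rfl ?_
  simp only [pvSweepStep, pvGapStep, max_def]
  split_ifs <;> omega

-- the `merged` accumulator only ever receives appends
theorem pvMergeLoop_acc (rest : List (Int × Int)) (acc : List (Int × Int)) (cs ce : Int) :
    pvMergeLoop rest acc cs ce = acc ++ pvMergeLoop rest [] cs ce := by
  induction rest generalizing acc cs ce with
  | nil => simp [pvMergeLoop]
  | cons hd tl ih =>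
      obtain ⟨s, e⟩ := hd
      simp only [pvMergeLoop]
      split_ifs with h
      · exact ih acc cs (max ce e)
      · rw [ih (acc ++ [(cs, ce)]) s e, ih ([] ++ [(cs, ce)]) s e, List.nil_append, List.append_assoc]

-- fusing: folding the complement step over the merged groups equals folding it
-- directly over the raw elements (seeded with the open group).
theorem pvMergeLoop_foldl (rest : List (Int × Int)) (st : List (Int × Int) × Int) (cs ce : Int) :
    (pvMergeLoop rest [] cs ce).foldl pvGapStep st = rest.foldl pvGapStep (pvGapStep st (cs, ce)) := by
  induction rest generalizing st cs ce with
  | nil => simp [pvMergeLoop]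
  | cons hd tl ih =>
      obtain ⟨s, e⟩ := hd
      simp only [pvMergeLoop]
      split_ifs with h
      · rw [ih st cs (max ce e)]
        simp only [List.foldl_cons]
        congr 1
        simp only [pvGapStep]
        have hnot : ¬ s > max st.2 ce := by
          simp only [not_lt]; exact le_trans h (le_max_right _ _)
        rw [if_neg hnot]
        exact Prod.ext rfl (by omega)
      · rw [pvMergeLoop_acc tl ([] ++ [(cs, ce)]) s e, List.nil_append]
        simp only [List.foldl_append, List.foldl_cons, List.foldl_nil]
        rw [ih (pvGapStep st (cs, ce)) s e]

theorem sorted_nil_iff (xs : List (Int × Int)) :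
    PySem.List.sorted xs (fun x => x.1) false = [] ↔ xs = [] := by
  constructor
  · intro h
    have := PySem.List.sorted_perm xs (fun x : Int × Int => x.1) false
    rw [h] at this
    exact (List.Perm.nil_eq this).symm
  · intro h; subst h; rfl

-- ===== VERDICT (by name: the statement is the Claim_ definition above) =====
theorem generate_working_intervals_full_spec : Claim_equal_generate_working_intervals_full := by
  intro horizon fixed_intervals _
  unfold Spec_generate_working_intervals_full
  unfold generate_working_intervals_full generate_working_intervals_full_alt merge_intervals
  rw [pvSweepStep_eq_pvGapStep]
  by_cases hnil : fixed_intervals = []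
  · subst hnil; rfl
  · rw [if_neg hnil]
    rcases hs : PySem.List.sorted fixed_intervals (fun x => x.1) false with _ | ⟨⟨cs, ce⟩, rest⟩
    · exact absurd ((sorted_nil_iff fixed_intervals).mp hs) hnil
    · simp only [pvMergeLoop_foldl, List.foldl_cons]
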